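-- pv_equiv track=rewrite | github.com/from-import/CCD_Smart_Car | MakeImage.py | find_road_edges
-- ===== SOURCE A (Python) =====
-- def find_road_edges(ccd_data, lastMiddlePosition=None):
--     left_edge = None  # 左边界位置初始化为 None
--     right_edge = None  # 右边界位置初始化为 None
--
--     # 检测连续两个相同值的元素，确定左边界和右边界
--     for i in range(len(ccd_data) - 1):
--         if ccd_data[i] == 1 and ccd_data[i + 1] == 1 and left_edge is None:
--             left_edge = i  # 找到连续两个1，作为左边界，避免误差影响
--         if ccd_data[i] == 0 and ccd_data[i + 1] == 0 and left_edge is not None: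
--             right_edge = i - 1  # 找到连续两个0，作为右边界，避免误差影响
--             break
--
--     # 如果没有检测到左边界或右边界
--     if left_edge is None:
--         left_edge = 0  # 假设左边界在最左边
--     if right_edge is None:
--         right_edge = len(ccd_data) - 1  # 假设右边界在最右边
--
--     # 计算中线位置
--     mid_line = (left_edge + right_edge) // 2
--
--     # 根据上一次的中线位置调整当前中线位置
--     if lastMiddlePosition is not None:
--         mid_line = (mid_line + lastMiddlePosition) // 2
--
--     return left_edge, right_edge, mid_line  # 返回左边界、右边界和中线位置的元组
-- ===== SOURCE B (Python) =====
-- def _runs(xs, start):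
--     """Run-length encode xs as a list of (value, start_index, length)."""
--     runs = []
--     i = 0
--     n = len(xs)
--     while i < n:
--         v = xs[i]
--         j = i + 1
--         while j < n and xs[j] == v:
--             j += 1
--         runs.append((v, start + i, j - i))
--         i = j
--     return runs
--
--
-- def find_road_edges(ccd_data, lastMiddlePosition=None):
--     n = len(ccd_data)
--     # Run-length encode the scan line; two consecutive equal values = a run of length >= 2.
--     left_edge = None
--     for v, s, L in _runs(ccd_data, 0):
--         if v == 1 and L >= 2:
--             left_edge = s
--             break
--     right_edge = None
--     if left_edge is not None:
--         for v, s, L in _runs(ccd_data[left_edge + 1:], left_edge + 1):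
--             if v == 0 and L >= 2:
--                 right_edge = s - 1
--                 break
--     if left_edge is None:
--         left_edge = 0
--     if right_edge is None:
--         right_edge = n - 1
--     mid_line = (left_edge + right_edge) // 2
--     if lastMiddlePosition is not None:
--         mid_line = (mid_line + lastMiddlePosition) // 2
--     return left_edge, right_edge, mid_line
-- ===== Notes on version B (the rewrite author's own statement) =====
-- stated objective: alternative
-- what changed: A's single index loop with two interacting pair-tests and a break is replaced by run-length encoding: B builds the list of (value, start, length) runs, takes the start of the first 1-run of length >= 2 as the left edge, then run-length encodes the suffix past it and takes the first 0-run of length >= 2 for the right edge; defaults and midline averaging are unchanged.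
import Mathlib
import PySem

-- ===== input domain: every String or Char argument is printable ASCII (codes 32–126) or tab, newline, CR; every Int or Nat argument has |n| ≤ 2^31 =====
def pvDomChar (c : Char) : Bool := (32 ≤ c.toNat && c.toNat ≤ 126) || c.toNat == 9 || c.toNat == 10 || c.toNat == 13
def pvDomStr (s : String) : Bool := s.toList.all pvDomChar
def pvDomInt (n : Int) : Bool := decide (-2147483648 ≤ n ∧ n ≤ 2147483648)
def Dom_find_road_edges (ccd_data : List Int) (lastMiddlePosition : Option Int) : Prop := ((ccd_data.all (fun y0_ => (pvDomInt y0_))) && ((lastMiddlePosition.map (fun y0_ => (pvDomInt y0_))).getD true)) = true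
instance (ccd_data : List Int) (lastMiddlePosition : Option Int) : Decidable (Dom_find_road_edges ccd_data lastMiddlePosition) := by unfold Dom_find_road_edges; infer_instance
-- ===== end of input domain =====

-- B replaces A's single index loop (two interacting pair tests with a break) by run-length
-- encoding: build the runs, pick the first 1-run of length ≥ 2 (left edge), then the first
-- 0-run of length ≥ 2 in the suffix past it (right edge); objective: alternative algorithm.

-- ===== PORT A =====
-- Indexing helper: every index A's loop touches is in range, so the .getD 0 default is never used.
def pvGet (ccd : List Int) (i : Int) : Int := (PySem.List.pyGet? ccd i).getD 0

-- A's loop over range(len-1): state is left_edge (Option); a break returns both edges.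
def pvALoop (ccd : List Int) : List Int → Option Int → Option Int × Option Int
  | [], left => (left, none)
  | i :: rest, left =>
    let left' := if pvGet ccd i == 1 && pvGet ccd (i+1) == 1 && left.isNone then some i else left
    if pvGet ccd i == 0 && pvGet ccd (i+1) == 0 && left'.isSome then (left', some (i-1))
    else pvALoop ccd rest left'

def find_road_edges (ccd_data : List Int) (lastMiddlePosition : Option Int) : Int × Int × Int :=
  let n : Int := ccd_data.length
  let lr := pvALoop ccd_data (PySem.List.pyRange 0 (n-1) 1) none
  let left := lr.1.getD 0
  let right := lr.2.getD (n-1)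
  let mid := PySem.Int.floordiv (left + right) 2
  let mid := match lastMiddlePosition with
    | some p => PySem.Int.floordiv (mid + p) 2
    | none => mid
  (left, right, mid)

-- ===== PORT B =====
-- inner while of _runs: how many leading elements of the remainder equal v
def pvCountEq (v : Int) : List Int → Nat
  | [] => 0
  | x :: rest => if x == v then pvCountEq v rest + 1 else 0

-- _runs(xs, start): run-length encoding as (value, start index, length)
def pvRuns : List Int → Int → List (Int × Int × Int)
  | [], _ => []
  | v :: rest, start =>
    let c := pvCountEq v rest
    (v, start, (c : Int) + 1) :: pvRuns (rest.drop c) (start + (c : Int) + 1)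
termination_by xs _ => xs.length
decreasing_by simp

-- B's first loop: first run of 1s of length ≥ 2 → its start
def pvFindLeftRun : List (Int × Int × Int) → Option Int
  | [] => none
  | (v, s, L) :: rest => if v == 1 && decide (2 ≤ L) then some s else pvFindLeftRun rest

-- B's second loop: first run of 0s of length ≥ 2 → its start - 1
def pvFindRightRun : List (Int × Int × Int) → Option Int
  | [] => none
  | (v, s, L) :: rest => if v == 0 && decide (2 ≤ L) then some (s - 1) else pvFindRightRun rest

def find_road_edges_alt (ccd_data : List Int) (lastMiddlePosition : Option Int) : Int × Int × Int :=
  let n : Int := ccd_data.length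
  let left? := pvFindLeftRun (pvRuns ccd_data 0)
  let right? := match left? with
    | none => none
    | some l => pvFindRightRun (pvRuns (PySem.List.slice ccd_data (some (l+1)) none) (l+1))
  let left := left?.getD 0
  let right := right?.getD (n-1)
  let mid := PySem.Int.floordiv (left + right) 2
  let mid := match lastMiddlePosition with
    | some p => PySem.Int.floordiv (mid + p) 2
    | none => mid
  (left, right, mid)

-- ===== PRECONDITION & SPEC =====
def Spec_find_road_edges (ccd_data : List Int) (lastMiddlePosition : Option Int) (out : Int × Int × Int) : Prop := out = find_road_edges_alt ccd_data lastMiddlePosition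
instance (ccd_data : List Int) (lastMiddlePosition : Option Int) (out : Int × Int × Int) : Decidable (Spec_find_road_edges ccd_data lastMiddlePosition out) := by unfold Spec_find_road_edges; infer_instance

-- ===== CLAIM (what is proved, stated in full; the proofs are below) =====
def Claim_equal_find_road_edges : Prop := ∀ (ccd_data : List Int) (lastMiddlePosition : Option Int), Dom_find_road_edges ccd_data lastMiddlePosition → Spec_find_road_edges ccd_data lastMiddlePosition (find_road_edges ccd_data lastMiddlePosition)

-- ===== LEMMAS AND PROOFS =====

-- proof middleman 1: A's indexed scans, made generic in the target value t
def pvScanPair (t : Int) (ccd : List Int) : List Int → Option Int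
  | [] => none
  | i :: rest => if pvGet ccd i == t && pvGet ccd (i+1) == t then some i else pvScanPair t ccd rest

-- proof middleman 2: structural scan for the first adjacent pair (t, t), reporting its index
def firstPairEq (t : Int) : List Int → Int → Option Int
  | x :: y :: rest, s => if x == t && y == t then some s else firstPairEq t (y :: rest) (s+1)
  | _, _ => none

-- proof middleman 3: generic form of B's run searches
def pvRunFind (t : Int) : List (Int × Int × Int) → Option Int
  | [] => none
  | (v, s, L) :: rest => if v == t && decide (2 ≤ L) then some s else pvRunFind t rest

-- Once left is set, A's loop never changes it and just scans for the first 0,0 pair.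
theorem pvALoop_some (ccd : List Int) (idxs : List Int) (l : Int) :
    pvALoop ccd idxs (some l) = (some l, (pvScanPair 0 ccd idxs).map (fun j => j - 1)) := by
  induction idxs with
  | nil => rfl
  | cons i rest ih =>
    simp only [pvALoop, pvScanPair, Option.isNone_some, Bool.and_false]
    by_cases h : (pvGet ccd i == 0 && pvGet ccd (i+1) == 0) = true
    · simp [h]
    · simp [h, ih]

-- A's loop from a fresh state = scan for the first 1,1 pair, then for the first 0,0 pair after it.
theorem pvALoop_none (ccd : List Int) (b : Int) : ∀ (a : Int),
    pvALoop ccd (PySem.List.pyRange a b 1) none =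
      (match pvScanPair 1 ccd (PySem.List.pyRange a b 1) with
       | none => (none, none)
       | some l => (some l, (pvScanPair 0 ccd (PySem.List.pyRange (l+1) b 1)).map (fun j => j - 1))) := by
  have H : ∀ (k : Nat) (a : Int), (b - a).toNat = k →
      pvALoop ccd (PySem.List.pyRange a b 1) none =
      (match pvScanPair 1 ccd (PySem.List.pyRange a b 1) with
       | none => (none, none)
       | some l => (some l, (pvScanPair 0 ccd (PySem.List.pyRange (l+1) b 1)).map (fun j => j - 1))) := by
    intro k
    induction k with
    | zero =>
      intro a hk
      rw [PySem.List.pyRange_one_eq_nil (by omega)]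
      rfl
    | succ k ih =>
      intro a hk
      rw [PySem.List.pyRange_one_cons (by omega)]
      by_cases h1 : (pvGet ccd a == 1 && pvGet ccd (a+1) == 1) = true
      · have ha1 : pvGet ccd a = 1 := by
          simp only [Bool.and_eq_true, beq_iff_eq] at h1; exact h1.1
        have h0 : (pvGet ccd a == 0 && pvGet ccd (a+1) == 0) = false := by
          simp [ha1]
        simp only [pvALoop, pvScanPair, h1, h0, Option.isNone_none, Bool.and_true, if_pos,
          Bool.false_and, Bool.false_eq_true, if_neg, not_false_eq_true]
        rw [pvALoop_some]
      · simp only [pvALoop, pvScanPair, h1, Option.isNone_none, Bool.and_true,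
          Bool.false_eq_true, if_neg, not_false_eq_true]
        have hstep :
            (if (pvGet ccd a == 0 && pvGet ccd (a+1) == 0 && (none : Option Int).isSome) = true
              then ((none : Option Int), some (a-1))
              else pvALoop ccd (PySem.List.pyRange (a+1) b 1) none) =
            pvALoop ccd (PySem.List.pyRange (a+1) b 1) none := by
          simp
        rw [hstep]
        exact ih (a+1) (by omega)
  intro a
  exact H (b - a).toNat a rfl

theorem firstPairEq_short (t : Int) (xs : List Int) (s : Int) (h : xs.length ≤ 1) :
    firstPairEq t xs s = none := by
  match xs with
  | [] => rfl
  | [x] => rfl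
  | x :: y :: rest => simp at h

-- bridge: A's indexed pair scan from index a = the structural pair scan over the suffix from a
theorem scanPair_bridge (t : Int) (ccd : List Int) : ∀ (a : Int), 0 ≤ a →
    pvScanPair t ccd (PySem.List.pyRange a ((ccd.length : Int) - 1) 1) =
      firstPairEq t (ccd.drop a.toNat) a := by
  have H : ∀ (k : Nat) (a : Int), 0 ≤ a → ((ccd.length : Int) - 1 - a).toNat = k →
      pvScanPair t ccd (PySem.List.pyRange a ((ccd.length : Int) - 1) 1) =
      firstPairEq t (ccd.drop a.toNat) a := by
    intro k
    induction k with
    | zero =>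
      intro a ha hk
      rw [PySem.List.pyRange_one_eq_nil (by omega)]
      rw [firstPairEq_short]
      · rfl
      · have hd : (ccd.drop a.toNat).length = ccd.length - a.toNat := List.length_drop
        omega
    | succ k ih =>
      intro a ha hk
      have hlt : a.toNat + 1 < ccd.length := by omega
      have hlt0 : a.toNat < ccd.length := by omega
      rw [PySem.List.pyRange_one_cons (by omega)]
      have hget0 : pvGet ccd a = ccd[a.toNat] := by
        rw [pvGet, PySem.List.pyGet?_eq_some_getElem ccd ha (by omega)]
        rfl
      have hget1 : pvGet ccd (a+1) = ccd[a.toNat + 1] := by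
        rw [pvGet, show a + 1 = ((a.toNat + 1 : Nat) : Int) from by omega,
          PySem.List.pyGet?_natCast, List.getElem?_eq_getElem hlt]
        rfl
      have hdrop : ccd.drop a.toNat = ccd[a.toNat] :: ccd[a.toNat + 1] :: ccd.drop (a.toNat + 2) := by
        rw [List.drop_eq_getElem_cons hlt0, List.drop_eq_getElem_cons hlt]
      have hdrop1 : ccd.drop (a+1).toNat = ccd[a.toNat + 1] :: ccd.drop (a.toNat + 2) := by
        have h1 : (a+1).toNat = a.toNat + 1 := by omega
        rw [h1, List.drop_eq_getElem_cons hlt]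
      rw [hdrop]
      simp only [pvScanPair, firstPairEq, hget0, hget1]
      by_cases hc : (ccd[a.toNat] == t && ccd[a.toNat + 1] == t) = true
      · simp [hc]
      · simp only [hc, Bool.false_eq_true, if_neg, not_false_eq_true]
        rw [← hdrop1]
        exact ih (a+1) (by omega) (by omega)
  intro a ha
  exact H ((ccd.length : Int) - 1 - a).toNat a ha rfl

-- skipping one non-t element does not change the structural scan
theorem firstPairEq_skip (t x : Int) (ys : List Int) (s : Int) (hx : x ≠ t) :
    firstPairEq t (x :: ys) s = firstPairEq t ys (s+1) := by
  match ys with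
  | [] => rfl
  | y :: rest => simp [firstPairEq, hx]

-- skipping a whole non-t run
theorem firstPairEq_skiprun (t v : Int) (hv : v ≠ t) : ∀ (rest : List Int) (s : Int),
    firstPairEq t (v :: rest) s =
      firstPairEq t (rest.drop (pvCountEq v rest)) (s + (pvCountEq v rest : Int) + 1) := by
  intro rest
  induction rest with
  | nil => intro s; simp [pvCountEq, firstPairEq]
  | cons w r2 ih =>
    intro s
    by_cases hw : w = v
    · subst hw
      have hc : pvCountEq w (w :: r2) = pvCountEq w r2 + 1 := by simp [pvCountEq]
      rw [hc, firstPairEq_skip t w (w :: r2) s hv, ih (s+1)]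
      simp only [List.drop_succ_cons]
      congr 1
      push_cast
      ring
    · have hc : pvCountEq v (w :: r2) = 0 := by simp [pvCountEq, hw]
      rw [hc, firstPairEq_skip t v (w :: r2) s hv]
      simp

-- the structural pair scan = the search over the run-length encoding
theorem runs_scan (t : Int) : ∀ (k : Nat) (xs : List Int), xs.length ≤ k → ∀ (s : Int),
    firstPairEq t xs s = pvRunFind t (pvRuns xs s) := by
  intro k
  induction k with
  | zero =>
    intro xs hxs s
    match xs with
    | [] => simp [pvRuns, firstPairEq, pvRunFind]
    | v :: rest => simp at hxs
  | succ k ih =>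
    intro xs hxs s
    match xs with
    | [] => simp [pvRuns, firstPairEq, pvRunFind]
    | v :: rest =>
      by_cases hv : v = t
      · subst hv
        match hrest : rest with
        | [] => simp [pvRuns, pvCountEq, firstPairEq, pvRunFind]
        | w :: r2 =>
          by_cases hw : w = v
          · subst hw
            have hc : pvCountEq w (w :: r2) = pvCountEq w r2 + 1 := by simp [pvCountEq]
            simp [pvRuns, hc, firstPairEq, pvRunFind]
          · have hc : pvCountEq v (w :: r2) = 0 := by simp [pvCountEq, hw]
            have hlen : (w :: r2).length ≤ k := by simp at hxs ⊢; omega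
            have hih := ih (w :: r2) hlen (s + 1)
            simp [pvRuns, hc, firstPairEq, hw, pvRunFind, hih]
      · have hpred : (v == t && decide (2 ≤ (pvCountEq v rest : Int) + 1)) = false := by
          simp [hv]
        simp only [pvRuns, pvRunFind, hpred, Bool.false_eq_true, if_neg, not_false_eq_true]
        rw [firstPairEq_skiprun t v hv rest s]
        have hlen : (rest.drop (pvCountEq v rest)).length ≤ k := by
          have : (rest.drop (pvCountEq v rest)).length ≤ rest.length := by
            simp
          simp at hxs
          omega
        rw [ih (rest.drop (pvCountEq v rest)) hlen (s + (pvCountEq v rest : Int) + 1)]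

theorem findLeftRun_eq (rs : List (Int × Int × Int)) : pvFindLeftRun rs = pvRunFind 1 rs := by
  induction rs with
  | nil => rfl
  | cons r rest ih => cases r with | mk v p => cases p with | mk s L => simp [pvFindLeftRun, pvRunFind, ih]

theorem findRightRun_eq (rs : List (Int × Int × Int)) :
    pvFindRightRun rs = (pvRunFind 0 rs).map (fun j => j - 1) := by
  induction rs with
  | nil => rfl
  | cons r rest ih =>
    cases r with | mk v p => cases p with | mk s L =>
      by_cases h : (v == 0 && decide (2 ≤ L)) = true
      · simp [pvFindRightRun, pvRunFind, h]
      · simp [pvFindRightRun, pvRunFind, h, ih]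

theorem firstPairEq_ge (t : Int) : ∀ (xs : List Int) (s l : Int),
    firstPairEq t xs s = some l → s ≤ l := by
  intro xs
  induction xs with
  | nil => intro s l h; simp [firstPairEq] at h
  | cons x rest ih =>
    intro s l h
    match rest with
    | [] => simp [firstPairEq] at h
    | y :: r2 =>
      by_cases hc : (x == t && y == t) = true
      · simp [firstPairEq, hc] at h; omega
      · simp only [firstPairEq, hc, Bool.false_eq_true, if_neg, not_false_eq_true] at h
        have := ih (s+1) l h
        omega

-- ===== VERDICT (by name: the statement is the Claim_ definition above) =====
theorem find_road_edges_spec : Claim_equal_find_road_edges := by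
  intro ccd lm _
  unfold Spec_find_road_edges
  simp only [find_road_edges, find_road_edges_alt, pvALoop_none]
  rw [scanPair_bridge 1 ccd 0 le_rfl]
  simp only [Int.toNat_zero, List.drop_zero]
  rw [runs_scan 1 ccd.length ccd le_rfl 0, ← findLeftRun_eq]
  cases h : pvFindLeftRun (pvRuns ccd 0)
  · simp
  · rename_i l
    have hl : (0:Int) ≤ l := by
      rw [findLeftRun_eq] at h
      rw [← runs_scan 1 ccd.length ccd le_rfl 0] at h
      exact firstPairEq_ge 1 ccd 0 l h
    dsimp only
    rw [scanPair_bridge 0 ccd (l+1) (by omega)]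
    rw [runs_scan 0 (ccd.drop (l+1).toNat).length _ le_rfl (l+1)]
    rw [PySem.List.slice_from ccd (by omega : (0:Int) ≤ l + 1), findRightRun_eq]
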